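-- pv_equiv track=rewrite | github.com/pypi-data/pypi-mirror-404 | packages/empathy-framework/empathy_framework-5.2.1.tar.gz/empathy_framework-5.2.1/src/empathy_os/workflows/code_review_adapters.py | _merge_verdicts
-- ===== SOURCE A (Python) =====
-- def _merge_verdicts(verdict1: str, verdict2: str) -> str:
--     """Merge two verdicts, taking the more severe one."""
--     severity_order = ["reject", "request_changes", "approve_with_suggestions", "approve"]
--     # Optimization: Dict for O(1) lookup instead of O(n) .index() call
--     severity_map = {v: i for i, v in enumerate(severity_order)}
--
--     # Normalize verdicts
--     v1 = verdict1.lower().replace("-", "_")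
--     v2 = verdict2.lower().replace("-", "_")
--
--     idx1 = severity_map.get(v1, 3)
--     idx2 = severity_map.get(v2, 3)
--
--     # Return more severe (lower index)
--     return severity_order[min(idx1, idx2)]
-- ===== SOURCE B (Python) =====
-- def _sev_bit(v: str) -> int:
--     """Encode a normalized verdict as a one-hot bit; more severe = lower bit. Unknown -> 8 (approve)."""
--     if v == "reject":
--         return 1
--     if v == "request_changes":
--         return 2
--     if v == "approve_with_suggestions":
--         return 4
--     return 8
--
--
-- def _merge_verdicts(verdict1: str, verdict2: str) -> str:
--     """Merge two verdicts, taking the more severe one."""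
--     v1 = verdict1.lower().replace("-", "_")
--     v2 = verdict2.lower().replace("-", "_")
--     # Combine the one-hot severity bits; clearing the lowest set bit and subtracting
--     # isolates it: the lowest set bit is the more severe verdict present.
--     mask = _sev_bit(v1) | _sev_bit(v2)
--     low = mask - (mask & (mask - 1))
--     if low == 1:
--         return "reject"
--     if low == 2:
--         return "request_changes"
--     if low == 4:
--         return "approve_with_suggestions"
--     return "approve"
-- ===== Notes on version B (the rewrite author's own statement) =====
-- stated objective: alternative
-- what changed: Dropped the severity list, rank dict, min-of-two-lookups and list indexing: each normalized verdict is encoded as a one-hot bit (lower bit = more severe, unknown -> the approve bit), the two codes are combined with bitwise OR, and the more severe verdict is recovered by isolating the lowest set bit via mask - (mask & (mask-1)).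
import Mathlib
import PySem

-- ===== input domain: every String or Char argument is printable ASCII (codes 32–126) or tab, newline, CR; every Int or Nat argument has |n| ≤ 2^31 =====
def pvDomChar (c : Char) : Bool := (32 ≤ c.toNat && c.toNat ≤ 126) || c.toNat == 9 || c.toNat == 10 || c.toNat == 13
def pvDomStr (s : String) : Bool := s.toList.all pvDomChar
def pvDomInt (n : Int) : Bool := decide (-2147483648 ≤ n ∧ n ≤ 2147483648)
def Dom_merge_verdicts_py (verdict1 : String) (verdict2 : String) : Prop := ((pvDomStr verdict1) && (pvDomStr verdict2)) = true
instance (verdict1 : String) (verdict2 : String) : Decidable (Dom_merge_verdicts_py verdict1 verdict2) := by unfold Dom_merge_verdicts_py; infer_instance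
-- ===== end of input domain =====

-- B replaces A's rank dict + min-of-two-lookups + list indexing by one-hot severity bits
-- combined with bitwise OR and a lowest-set-bit extraction (objective: alternative).

-- ===== PORT A =====
def merge_verdicts_py (verdict1 : String) (verdict2 : String) : String :=
  let severity_order : List String := ["reject", "request_changes", "approve_with_suggestions", "approve"]
  -- severity_map = {v: i for i, v in enumerate(severity_order)}
  let severity_map : PySem.Dict String Int :=
    (PySem.List.enumerate severity_order).foldl (fun d iv => d.insert iv.2 iv.1) (PySem.Dict.mk [])
  let v1 := PySem.Str.replace (PySem.Str.lower verdict1) "-" "_"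
  let v2 := PySem.Str.replace (PySem.Str.lower verdict2) "-" "_"
  let idx1 := severity_map.getD v1 3
  let idx2 := severity_map.getD v2 3
  -- severity_order[min idx1 idx2]: the index is always 0..3, in range, so the default is never used
  PySem.List.pyGetD severity_order (min idx1 idx2) ""

-- ===== PORT B =====
-- _sev_bit: one-hot severity bit, lower bit = more severe, unknown -> 8
def mvSevBit (v : String) : Int :=
  if v = "reject" then 1
  else if v = "request_changes" then 2
  else if v = "approve_with_suggestions" then 4
  else 8

def merge_verdicts_py_alt (verdict1 : String) (verdict2 : String) : String :=
  let v1 := PySem.Str.replace (PySem.Str.lower verdict1) "-" "_"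
  let v2 := PySem.Str.replace (PySem.Str.lower verdict2) "-" "_"
  -- mask = _sev_bit(v1) | _sev_bit(v2); Python's int '|' and '&' are Int.lor/Int.land (exact; operands here are nonnegative)
  let mask := Int.lor (mvSevBit v1) (mvSevBit v2)
  -- low = mask - (mask & (mask - 1))
  let low := mask - Int.land mask (mask - 1)
  if low = 1 then "reject"
  else if low = 2 then "request_changes"
  else if low = 4 then "approve_with_suggestions"
  else "approve"

-- ===== PRECONDITION & SPEC =====
def Spec_merge_verdicts_py (verdict1 : String) (verdict2 : String) (out : String) : Prop := out = merge_verdicts_py_alt verdict1 verdict2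
instance (verdict1 : String) (verdict2 : String) (out : String) : Decidable (Spec_merge_verdicts_py verdict1 verdict2 out) := by unfold Spec_merge_verdicts_py; infer_instance

-- ===== CLAIM (what is proved, stated in full; the proofs are below) =====
def Claim_equal_merge_verdicts_py : Prop := ∀ (verdict1 : String) (verdict2 : String), Dom_merge_verdicts_py verdict1 verdict2 → Spec_merge_verdicts_py verdict1 verdict2 (merge_verdicts_py verdict1 verdict2)

-- ===== LEMMAS AND PROOFS =====

-- A's severity_map is the literal four-entry dict; its .get(v, 3) as nested ifs
theorem rank_eq (v : String) :
    ((PySem.List.enumerate ["reject", "request_changes", "approve_with_suggestions", "approve"]).foldl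
        (fun d iv => d.insert iv.2 iv.1) (PySem.Dict.mk ([] : List (String × Int)))).getD v 3
    = if v = "reject" then 0 else if v = "request_changes" then 1
      else if v = "approve_with_suggestions" then 2 else 3 := by
  simp only [PySem.List.enumerate, List.foldl, show PySem.List.enumerate.go 0
      ["reject", "request_changes", "approve_with_suggestions", "approve"] =
      [((0:Int),"reject"),(1,"request_changes"),(2,"approve_with_suggestions"),(3,"approve")] from rfl]
  by_cases ha : v = "reject" <;> by_cases hb : v = "request_changes" <;>
    by_cases hc : v = "approve_with_suggestions" <;> by_cases hd : v = "approve" <;>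
    simp_all [PySem.Dict.getD_insert] <;>
    simp_all [PySem.Dict.getD, PySem.Dict.get?]

-- both results depend only on the normalized strings; compare them for arbitrary v1 v2
theorem merge_core (v1 v2 : String) :
    (let severity_order : List String := ["reject", "request_changes", "approve_with_suggestions", "approve"]
     let severity_map : PySem.Dict String Int :=
       (PySem.List.enumerate severity_order).foldl (fun d iv => d.insert iv.2 iv.1) (PySem.Dict.mk [])
     PySem.List.pyGetD severity_order (min (severity_map.getD v1 3) (severity_map.getD v2 3)) "")
    = (let mask := Int.lor (mvSevBit v1) (mvSevBit v2)
       let low := mask - Int.land mask (mask - 1)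
       if low = 1 then "reject"
       else if low = 2 then "request_changes"
       else if low = 4 then "approve_with_suggestions"
       else "approve") := by
  simp only [rank_eq, mvSevBit]
  by_cases h1a : v1 = "reject" <;> by_cases h1b : v1 = "request_changes" <;>
    by_cases h1c : v1 = "approve_with_suggestions" <;>
    by_cases h2a : v2 = "reject" <;> by_cases h2b : v2 = "request_changes" <;>
    by_cases h2c : v2 = "approve_with_suggestions" <;>
    simp_all <;> decide

-- ===== VERDICT (by name: the statement is the Claim_ definition above) =====
theorem merge_verdicts_py_spec : Claim_equal_merge_verdicts_py := by
  intro verdict1 verdict2 _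
  unfold Spec_merge_verdicts_py merge_verdicts_py merge_verdicts_py_alt
  exact merge_core _ _
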